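-- pv_equiv track=rewrite | github.com/MSS23/vgc-mcp | src/vgc_mcp/rules/item_clause.py | suggest_alternative_items
-- ===== SOURCE A (Python) =====
-- def normalize_item_name(item: str) -> str:
--     """Normalize item name for comparison."""
--     if not item:
--         return ""
--     return item.lower().replace(" ", "-").replace("'", "").strip()
--
-- def suggest_alternative_items(current_item: str, pokemon_role: str = None) -> list[str]:
--     """
--     Suggest alternative items when there's a duplicate.
--
--     Args:
--         current_item: The item that's duplicated
--         pokemon_role: Optional role hint (attacker, support, etc.)
--
--     Returns:
--         List of suggested alternative items
--     """
--     # Common competitive items by category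
--     OFFENSIVE_ITEMS = [
--         "choice-band", "choice-specs", "choice-scarf",
--         "life-orb", "expert-belt", "muscle-band", "wise-glasses",
--         "assault-vest",
--     ]
--
--     DEFENSIVE_ITEMS = [
--         "leftovers", "sitrus-berry", "assault-vest",
--         "rocky-helmet", "safety-goggles", "shed-shell",
--     ]
--
--     UTILITY_ITEMS = [
--         "focus-sash", "eject-button", "eject-pack",
--         "covert-cloak", "clear-amulet", "mirror-herb",
--     ]
--
--     BERRIES = [
--         "sitrus-berry", "lum-berry", "aguav-berry",
--         "figy-berry", "wiki-berry", "mago-berry", "iapapa-berry",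
--     ]
--
--     TERA_ITEMS = [
--         "booster-energy",
--     ]
--
--     TYPE_ITEMS = [
--         "charcoal", "mystic-water", "magnet", "miracle-seed",
--         "never-melt-ice", "black-belt", "poison-barb", "soft-sand",
--         "sharp-beak", "twisted-spoon", "silver-powder", "hard-stone",
--         "spell-tag", "dragon-fang", "black-glasses", "metal-coat",
--         "fairy-feather",
--     ]
--
--     normalized = normalize_item_name(current_item)
--
--     # Collect all alternatives
--     all_items = (
--         OFFENSIVE_ITEMS + DEFENSIVE_ITEMS + UTILITY_ITEMS +
--         BERRIES + TERA_ITEMS + TYPE_ITEMS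
--     )
--
--     # Remove the current item from suggestions
--     alternatives = [item for item in all_items if item != normalized]
--
--     # If role is specified, prioritize relevant items
--     if pokemon_role:
--         role = pokemon_role.lower()
--         if role in ["attacker", "offensive", "sweeper"]:
--             # Put offensive items first
--             offensive_set = set(OFFENSIVE_ITEMS)
--             alternatives = (
--                 [i for i in alternatives if i in offensive_set] +
--                 [i for i in alternatives if i not in offensive_set]
--             )
--         elif role in ["support", "defensive", "tank"]:
--             # Put defensive/utility items first
--             support_set = set(DEFENSIVE_ITEMS + UTILITY_ITEMS)
--             alternatives = (
--                 [i for i in alternatives if i in support_set] +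
--                 [i for i in alternatives if i not in support_set]
--             )
--
--     return alternatives[:10]  # Return top 10 suggestions
-- ===== SOURCE B (Python) =====
-- def normalize_item_name(item: str) -> str:
--     """Normalize item name for comparison."""
--     if not item:
--         return ""
--     return item.lower().replace(" ", "-").replace("'", "").strip()
--
-- OFFENSIVE_ITEMS = [
--     "choice-band", "choice-specs", "choice-scarf",
--     "life-orb", "expert-belt", "muscle-band", "wise-glasses",
--     "assault-vest",
-- ]
--
-- DEFENSIVE_ITEMS = [
--     "leftovers", "sitrus-berry", "assault-vest",
--     "rocky-helmet", "safety-goggles", "shed-shell",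
-- ]
--
-- UTILITY_ITEMS = [
--     "focus-sash", "eject-button", "eject-pack",
--     "covert-cloak", "clear-amulet", "mirror-herb",
-- ]
--
-- BERRIES = [
--     "sitrus-berry", "lum-berry", "aguav-berry",
--     "figy-berry", "wiki-berry", "mago-berry", "iapapa-berry",
-- ]
--
-- TERA_ITEMS = [
--     "booster-energy",
-- ]
--
-- TYPE_ITEMS = [
--     "charcoal", "mystic-water", "magnet", "miracle-seed",
--     "never-melt-ice", "black-belt", "poison-barb", "soft-sand",
--     "sharp-beak", "twisted-spoon", "silver-powder", "hard-stone",
--     "spell-tag", "dragon-fang", "black-glasses", "metal-coat",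
--     "fairy-feather",
-- ]
--
-- ALL_ITEMS = (
--     OFFENSIVE_ITEMS + DEFENSIVE_ITEMS + UTILITY_ITEMS +
--     BERRIES + TERA_ITEMS + TYPE_ITEMS
-- )
--
-- _OFFENSIVE_SET = frozenset(OFFENSIVE_ITEMS)
-- _SUPPORT_SET = frozenset(DEFENSIVE_ITEMS + UTILITY_ITEMS)
--
-- ROLE_PRIORITY = {
--     "attacker": _OFFENSIVE_SET,
--     "offensive": _OFFENSIVE_SET,
--     "sweeper": _OFFENSIVE_SET,
--     "support": _SUPPORT_SET,
--     "defensive": _SUPPORT_SET,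
--     "tank": _SUPPORT_SET,
-- }
--
--
-- def suggest_alternative_items(current_item: str, pokemon_role: str = None) -> list[str]:
--     """Suggest alternative items when there's a duplicate (role table + stable sort)."""
--     normalized = normalize_item_name(current_item)
--     alternatives = [item for item in ALL_ITEMS if item != normalized]
--     priority = ROLE_PRIORITY.get(pokemon_role.lower()) if pokemon_role else None
--     if priority is not None:
--         alternatives = sorted(alternatives, key=lambda i: 0 if i in priority else 1)
--     return alternatives[:10]
-- ===== Notes on version B (the rewrite author's own statement) =====
-- stated objective: idiomatic
-- what changed: The if/elif role chain with a two-comprehension partition is replaced by a module-level role-to-priority-set table looked up once and a single stable sort on a 0/1 key, which reproduces the partition order.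
import Mathlib
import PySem

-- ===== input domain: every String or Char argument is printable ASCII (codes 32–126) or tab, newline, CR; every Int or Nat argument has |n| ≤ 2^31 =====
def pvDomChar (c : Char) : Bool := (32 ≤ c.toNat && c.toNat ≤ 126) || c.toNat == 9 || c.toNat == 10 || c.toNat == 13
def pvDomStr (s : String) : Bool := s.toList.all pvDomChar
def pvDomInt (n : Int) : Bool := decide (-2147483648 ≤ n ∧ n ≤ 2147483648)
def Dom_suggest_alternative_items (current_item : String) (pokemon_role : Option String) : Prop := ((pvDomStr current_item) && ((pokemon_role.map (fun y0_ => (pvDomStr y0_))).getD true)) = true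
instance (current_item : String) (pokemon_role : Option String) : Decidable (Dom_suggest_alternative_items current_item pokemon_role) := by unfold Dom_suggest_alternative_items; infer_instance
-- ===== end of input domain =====

-- B replaces the if/elif role chain + two-comprehension partition by a role→priority-set
-- table and one stable sort on a 0/1 key (idiomatic; same cost).

-- ===== PORT A =====
def normalize_item_name (item : String) : String :=
  if item = "" then ""
  else PySem.Str.strip (PySem.Str.replace (PySem.Str.replace (PySem.Str.lower item) " " "-") "'" "")

def pvOffensiveItems : List String :=
  ["choice-band", "choice-specs", "choice-scarf",
   "life-orb", "expert-belt", "muscle-band", "wise-glasses",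
   "assault-vest"]

def pvDefensiveItems : List String :=
  ["leftovers", "sitrus-berry", "assault-vest",
   "rocky-helmet", "safety-goggles", "shed-shell"]

def pvUtilityItems : List String :=
  ["focus-sash", "eject-button", "eject-pack",
   "covert-cloak", "clear-amulet", "mirror-herb"]

def pvBerries : List String :=
  ["sitrus-berry", "lum-berry", "aguav-berry",
   "figy-berry", "wiki-berry", "mago-berry", "iapapa-berry"]

def pvTeraItems : List String := ["booster-energy"]

def pvTypeItems : List String :=
  ["charcoal", "mystic-water", "magnet", "miracle-seed",
   "never-melt-ice", "black-belt", "poison-barb", "soft-sand",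
   "sharp-beak", "twisted-spoon", "silver-powder", "hard-stone",
   "spell-tag", "dragon-fang", "black-glasses", "metal-coat",
   "fairy-feather"]

def suggest_alternative_items (current_item : String) (pokemon_role : Option String) : List String :=
  let normalized := normalize_item_name current_item
  let all_items := pvOffensiveItems ++ pvDefensiveItems ++ pvUtilityItems ++
                   pvBerries ++ pvTeraItems ++ pvTypeItems
  let alternatives := all_items.filter (fun item => item ≠ normalized)
  let alternatives :=
    match pokemon_role with
    | none => alternatives
    | some pr =>
      if pr = "" then alternatives
      else
        let role := PySem.Str.lower pr
        if role = "attacker" ∨ role = "offensive" ∨ role = "sweeper" then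
          let offensive_set : PySem.Set String := PySem.Set.ofList pvOffensiveItems
          alternatives.filter (fun i => i ∈ offensive_set) ++
          alternatives.filter (fun i => i ∉ offensive_set)
        else if role = "support" ∨ role = "defensive" ∨ role = "tank" then
          let support_set : PySem.Set String := PySem.Set.ofList (pvDefensiveItems ++ pvUtilityItems)
          alternatives.filter (fun i => i ∈ support_set) ++
          alternatives.filter (fun i => i ∉ support_set)
        else alternatives
  PySem.List.slice alternatives none (some 10)

-- ===== PORT B =====
def pvAllItems : List String :=
  pvOffensiveItems ++ pvDefensiveItems ++ pvUtilityItems ++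
  pvBerries ++ pvTeraItems ++ pvTypeItems

def pvOffensiveSet : PySem.Set String := PySem.Set.ofList pvOffensiveItems

def pvSupportSet : PySem.Set String := PySem.Set.ofList (pvDefensiveItems ++ pvUtilityItems)

def pvRolePriority : PySem.Dict String (PySem.Set String) :=
  PySem.Dict.ofList
    [("attacker", pvOffensiveSet), ("offensive", pvOffensiveSet), ("sweeper", pvOffensiveSet),
     ("support", pvSupportSet), ("defensive", pvSupportSet), ("tank", pvSupportSet)]

def suggest_alternative_items_alt (current_item : String) (pokemon_role : Option String) : List String :=
  let normalized := normalize_item_name current_item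
  let alternatives := pvAllItems.filter (fun item => item ≠ normalized)
  let priority : Option (PySem.Set String) :=
    match pokemon_role with
    | some pr => if pr = "" then none else pvRolePriority.get? (PySem.Str.lower pr)
    | none => none
  let alternatives :=
    match priority with
    | some s => PySem.List.sorted alternatives (fun i => if i ∈ s then (0 : Int) else 1) false
    | none => alternatives
  PySem.List.slice alternatives none (some 10)

-- ===== PRECONDITION & SPEC =====
def Spec_suggest_alternative_items (current_item : String) (pokemon_role : Option String) (out : List String) : Prop := out = suggest_alternative_items_alt current_item pokemon_role
instance (current_item : String) (pokemon_role : Option String) (out : List String) : Decidable (Spec_suggest_alternative_items current_item pokemon_role out) := by unfold Spec_suggest_alternative_items; infer_instance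

-- ===== CLAIM (what is proved, stated in full; the proofs are below) =====
def Claim_equal_suggest_alternative_items : Prop := ∀ (current_item : String) (pokemon_role : Option String), Dom_suggest_alternative_items current_item pokemon_role → Spec_suggest_alternative_items current_item pokemon_role (suggest_alternative_items current_item pokemon_role)

-- ===== LEMMAS AND PROOFS =====

-- Inserting x into a partitioned list F ++ T (F all satisfying p, T all failing p)
-- with the 0/1-key comparator puts x after F if p x, else at the very end.
theorem pv_insertBy_partitioned {α : Type} (p : α → Prop) [DecidablePred p]
    (x : α) (F T : List α) (hF : ∀ y ∈ F, p y) (hT : ∀ y ∈ T, ¬ p y) :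
    PySem.List.insertBy
      (fun a b => decide ((if p a then (0 : Int) else 1) < (if p b then (0 : Int) else 1)))
      x (F ++ T)
    = if p x then F ++ x :: T else (F ++ T) ++ [x] := by
  by_cases hx : p x
  · simp only [hx, if_pos]
    induction F with
    | nil =>
      cases T with
      | nil => simp [PySem.List.insertBy]
      | cons z T' =>
        have hz : ¬ p z := hT z (by simp)
        simp [PySem.List.insertBy, hx, hz]
    | cons f F' ih =>
      have hf : p f := hF f (by simp)
      simp only [List.cons_append, PySem.List.insertBy, hx, hf]
      simp only [lt_self_iff_false, decide_false, Bool.false_eq_true, if_false]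
      rw [ih (fun y hy => hF y (by simp [hy]))]
  · simp only [hx, if_neg, not_false_iff]
    apply PySem.List.insertBy_of_forall_not_before
    intro y hy
    rcases List.mem_append.mp hy with h | h
    · have := hF y h; simp [hx, this]
    · have := hT y h; simp [hx, this]

theorem pv_foldl_insertBy_partition {α : Type} (p : α → Prop) [DecidablePred p]
    (xs F T : List α) (hF : ∀ y ∈ F, p y) (hT : ∀ y ∈ T, ¬ p y) :
    xs.foldl (fun acc x =>
      PySem.List.insertBy
        (fun a b => decide ((if p a then (0 : Int) else 1) < (if p b then (0 : Int) else 1)))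
        x acc) (F ++ T)
    = (F ++ xs.filter (fun i => p i)) ++ (T ++ xs.filter (fun i => ¬ p i)) := by
  induction xs generalizing F T with
  | nil => simp
  | cons x xs ih =>
    simp only [List.foldl_cons]
    rw [pv_insertBy_partitioned p x F T hF hT]
    by_cases hx : p x
    · simp only [hx, if_pos]
      have : F ++ x :: T = (F ++ [x]) ++ T := by simp
      rw [this, ih (F ++ [x]) T
        (by intro y hy; rcases List.mem_append.mp hy with h | h
            · exact hF y h
            · simp at h; subst h; exact hx) hT]
      simp [hx]
    · simp only [hx, if_neg, not_false_iff]
      have : (F ++ T) ++ [x] = F ++ (T ++ [x]) := by simp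
      rw [this, ih F (T ++ [x]) hF
        (by intro y hy; rcases List.mem_append.mp hy with h | h
            · exact hT y h
            · simp at h; subst h; exact hx)]
      simp [hx]

-- Python's stable sort on a 0/1 key IS the two-filter partition.
theorem pv_sorted_binary_key {α : Type} (p : α → Prop) [DecidablePred p] (xs : List α) :
    PySem.List.sorted xs (fun i => if p i then (0 : Int) else 1) false
    = xs.filter (fun i => p i) ++ xs.filter (fun i => ¬ p i) := by
  rw [PySem.List.sorted_eq_foldl_insertBy]
  have := pv_foldl_insertBy_partition p xs [] [] (by simp) (by simp)
  simpa using this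

theorem pv_get?_attacker : pvRolePriority.get? "attacker" = some pvOffensiveSet := by decide
theorem pv_get?_offensive : pvRolePriority.get? "offensive" = some pvOffensiveSet := by decide
theorem pv_get?_sweeper : pvRolePriority.get? "sweeper" = some pvOffensiveSet := by decide
theorem pv_get?_support : pvRolePriority.get? "support" = some pvSupportSet := by decide
theorem pv_get?_defensive : pvRolePriority.get? "defensive" = some pvSupportSet := by decide
theorem pv_get?_tank : pvRolePriority.get? "tank" = some pvSupportSet := by decide

theorem pv_get?_other (r : String)
    (h1 : r ≠ "attacker") (h2 : r ≠ "offensive") (h3 : r ≠ "sweeper")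
    (h4 : r ≠ "support") (h5 : r ≠ "defensive") (h6 : r ≠ "tank") :
    pvRolePriority.get? r = none := by
  have e : pvRolePriority = PySem.Dict.mk
      [("attacker", pvOffensiveSet), ("offensive", pvOffensiveSet), ("sweeper", pvOffensiveSet),
       ("support", pvSupportSet), ("defensive", pvSupportSet), ("tank", pvSupportSet)] := by decide
  rw [e]
  simp [Ne.symm h1, Ne.symm h2, Ne.symm h3,
        Ne.symm h4, Ne.symm h5, Ne.symm h6, PySem.Dict.get?]

-- ===== VERDICT (by name: the statement is the Claim_ definition above) =====
theorem suggest_alternative_items_spec : Claim_equal_suggest_alternative_items := by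
  intro current_item pokemon_role _
  show _ = suggest_alternative_items_alt current_item pokemon_role
  unfold suggest_alternative_items suggest_alternative_items_alt
  simp only [pvAllItems]
  cases pokemon_role with
  | none => rfl
  | some pr =>
    by_cases hpr : pr = ""
    · simp [hpr]
    · simp only [hpr, if_neg, not_false_iff]
      by_cases hA : PySem.Str.lower pr = "attacker" ∨ PySem.Str.lower pr = "offensive" ∨
          PySem.Str.lower pr = "sweeper"
      · have hget : pvRolePriority.get? (PySem.Str.lower pr) = some pvOffensiveSet := by
          rcases hA with h | h | h <;> rw [h]
          · exact pv_get?_attacker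
          · exact pv_get?_offensive
          · exact pv_get?_sweeper
        rw [if_pos hA, hget]
        simp only [pv_sorted_binary_key (fun i => i ∈ pvOffensiveSet)]
        rfl
      · by_cases hB : PySem.Str.lower pr = "support" ∨ PySem.Str.lower pr = "defensive" ∨
            PySem.Str.lower pr = "tank"
        · have hget : pvRolePriority.get? (PySem.Str.lower pr) = some pvSupportSet := by
            rcases hB with h | h | h <;> rw [h]
            · exact pv_get?_support
            · exact pv_get?_defensive
            · exact pv_get?_tank
          rw [if_neg hA, if_pos hB, hget]
          simp only [pv_sorted_binary_key (fun i => i ∈ pvSupportSet)]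
          rfl
        · push Not at hA hB
          have hget := pv_get?_other _ hA.1 hA.2.1 hA.2.2 hB.1 hB.2.1 hB.2.2
          rw [hget, if_neg, if_neg]
          · rintro (h | h | h) <;> simp [h] at hB
          · rintro (h | h | h) <;> simp [h] at hA
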